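-- pv_equiv track=rewrite | github.com/pypi-data/pypi-mirror-365 | packages/pydantic-fire/pydantic_fire-1.0.0.tar.gz/pydantic_fire-1.0.0/pydantic_fire/utils/docs_generator.py | _generate_issues_markdown
-- ===== SOURCE A (Python) =====
-- from typing import Dict, List, Any, Optional, Type, TYPE_CHECKING
--
-- def _generate_issues_markdown(issues: List[Dict[str, Any]]) -> List[str]:
--     """Generate issues section in Markdown."""
--     lines = [
--         "## Issues",
--         "",
--         f"Found {len(issues)} potential issue(s) in the schema:",
--         "",
--     ]
--
--     # Group issues by severity
--     issues_by_severity = {}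
--     for issue in issues:
--         severity = issue.get('severity', 'info')
--         if severity not in issues_by_severity:
--             issues_by_severity[severity] = []
--         issues_by_severity[severity].append(issue)
--
--     for severity in ['error', 'warning', 'info']:
--         if severity in issues_by_severity:
--             lines.extend([
--                 f"### {severity.title()} Issues",
--                 "",
--             ])
--
--             for issue in issues_by_severity[severity]:
--                 lines.extend([
--                     f"**{issue.get('type', 'Unknown')}**",
--                     f"- Collection: `{issue.get('collection', 'Unknown')}`",
--                 ])
--
--                 if 'field' in issue:
--                     lines.append(f"- Field: `{issue['field']}`")
--
--                 lines.extend([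
--                     f"- Message: {issue.get('message', 'No message')}",
--                     "",
--                 ])
--
--     return lines
-- ===== SOURCE B (Python) =====
-- from typing import Dict, List, Any
--
--
-- def _issue_lines(issue: Dict[str, Any]) -> List[str]:
--     lines = [
--         f"**{issue.get('type', 'Unknown')}**",
--         f"- Collection: `{issue.get('collection', 'Unknown')}`",
--     ]
--     if 'field' in issue:
--         lines.append(f"- Field: `{issue['field']}`")
--     lines.append(f"- Message: {issue.get('message', 'No message')}")
--     lines.append("")
--     return lines
--
--
-- def _severity_section(severity: str, issues: List[Dict[str, Any]]) -> List[str]: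
--     matching = [i for i in issues if i.get('severity', 'info') == severity]
--     if not matching:
--         return []
--     return [f"### {severity.title()} Issues", ""] + [ln for i in matching for ln in _issue_lines(i)]
--
--
-- def _generate_issues_markdown(issues: List[Dict[str, Any]]) -> List[str]:
--     """Generate issues section in Markdown."""
--     return [
--         "## Issues",
--         "",
--         f"Found {len(issues)} potential issue(s) in the schema:",
--         "",
--     ] + [ln for s in ('error', 'warning', 'info') for ln in _severity_section(s, issues)]
-- ===== Notes on version B (the rewrite author's own statement) =====
-- stated objective: simpler
-- what changed: B drops A's severity-grouping dict and its mutating accumulator loops entirely: it concatenates the header with a flat per-severity construction, where each section filters the issues for that severity once (same 'info' default, original order) and is emitted only when non-empty.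
import Mathlib
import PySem

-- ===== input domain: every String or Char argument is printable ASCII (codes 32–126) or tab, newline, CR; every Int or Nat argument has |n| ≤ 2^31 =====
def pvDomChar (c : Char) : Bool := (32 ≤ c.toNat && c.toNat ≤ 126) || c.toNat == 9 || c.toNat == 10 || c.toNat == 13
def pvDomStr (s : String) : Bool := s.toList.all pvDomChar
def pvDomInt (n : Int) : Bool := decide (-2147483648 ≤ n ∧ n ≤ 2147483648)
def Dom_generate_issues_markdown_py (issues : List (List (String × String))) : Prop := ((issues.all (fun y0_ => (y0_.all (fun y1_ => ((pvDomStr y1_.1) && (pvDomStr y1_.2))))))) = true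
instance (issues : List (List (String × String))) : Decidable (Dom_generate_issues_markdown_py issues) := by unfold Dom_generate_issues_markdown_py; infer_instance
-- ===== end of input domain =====

-- B drops A's grouping dict and builds the section list directly by filtering per severity; objective: simpler.

-- str.title, exact on ASCII input (uppercase the first letter of each alphabetic run, lowercase the rest);
-- both Pythons call .title() (only on the literals "error"/"warning"/"info").
def pvTitleGo : List Char → Bool → List Char
  | [], _ => []
  | c :: cs, prev =>
    (if c.isAlpha then (if prev then c.toLower else c.toUpper) else c) :: pvTitleGo cs c.isAlpha

def pvTitle (s : String) : String := String.ofList (pvTitleGo s.toList false)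

-- ===== PORT A =====
def generate_issues_markdown_py (issues : List (List (String × String))) : List String :=
  let lines : List String := ["## Issues", "",
    "Found " ++ PySem.Int.toStr (issues.length : Int) ++ " potential issue(s) in the schema:", ""]
  let issues_by_severity : PySem.Dict String (List (List (String × String))) :=
    issues.foldl (fun d issue =>
      let severity := (PySem.Dict.mk issue).getD "severity" "info"
      let d := if d.contains severity then d else d.insert severity []
      d.modify severity [] (fun xs => xs ++ [issue])) PySem.Dict.empty
  ["error", "warning", "info"].foldl (fun lines severity =>
    if issues_by_severity.contains severity then
      let lines := lines ++ ["### " ++ pvTitle severity ++ " Issues", ""]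
      (issues_by_severity.getD severity []).foldl (fun lines issue =>
        let lines := lines ++
          ["**" ++ (PySem.Dict.mk issue).getD "type" "Unknown" ++ "**",
           "- Collection: `" ++ (PySem.Dict.mk issue).getD "collection" "Unknown" ++ "`"]
        let lines := if (PySem.Dict.mk issue).contains "field" then
            lines ++ ["- Field: `" ++ ((PySem.Dict.mk issue).get? "field").getD "" ++ "`"]
          else lines
        lines ++ ["- Message: " ++ (PySem.Dict.mk issue).getD "message" "No message", ""]) lines
    else lines) lines

-- ===== PORT B =====
def pvIssueLines (issue : List (String × String)) : List String :=
  let lines : List String :=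
    ["**" ++ (PySem.Dict.mk issue).getD "type" "Unknown" ++ "**",
     "- Collection: `" ++ (PySem.Dict.mk issue).getD "collection" "Unknown" ++ "`"]
  let lines := if (PySem.Dict.mk issue).contains "field" then
      lines ++ ["- Field: `" ++ ((PySem.Dict.mk issue).get? "field").getD "" ++ "`"]
    else lines
  lines ++ ["- Message: " ++ (PySem.Dict.mk issue).getD "message" "No message", ""]

def pvSeveritySection (severity : String) (issues : List (List (String × String))) : List String :=
  let matching := issues.filter (fun i => (PySem.Dict.mk i).getD "severity" "info" == severity)
  if matching.isEmpty then []
  else ["### " ++ pvTitle severity ++ " Issues", ""] ++ matching.flatMap pvIssueLines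

def generate_issues_markdown_py_alt (issues : List (List (String × String))) : List String :=
  ["## Issues", "",
   "Found " ++ PySem.Int.toStr (issues.length : Int) ++ " potential issue(s) in the schema:", ""]
  ++ ["error", "warning", "info"].flatMap (fun s => pvSeveritySection s issues)

-- ===== PRECONDITION & SPEC =====
def Spec_generate_issues_markdown_py (issues : List (List (String × String))) (out : List String) : Prop := out = generate_issues_markdown_py_alt issues
instance (issues : List (List (String × String))) (out : List String) : Decidable (Spec_generate_issues_markdown_py issues out) := by unfold Spec_generate_issues_markdown_py; infer_instance

-- ===== CLAIM (what is proved, stated in full; the proofs are below) =====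
def Claim_equal_generate_issues_markdown_py : Prop := ∀ (issues : List (List (String × String))), Dom_generate_issues_markdown_py issues → Spec_generate_issues_markdown_py issues (generate_issues_markdown_py issues)

-- ===== LEMMAS AND PROOFS =====

-- severity of an issue
def pvSevOf (i : List (String × String)) : String := (PySem.Dict.mk i).getD "severity" "info"

-- the grouping dict built by A's first loop, in modify-only form
def pvGroup (issues : List (List (String × String))) :
    PySem.Dict String (List (List (String × String))) :=
  issues.foldl (fun d issue => d.modify (pvSevOf issue) [] (fun xs => xs ++ [issue])) PySem.Dict.empty

lemma pv_step_eq (d : PySem.Dict String (List (List (String × String)))) (k : String)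
    (issue : List (String × String)) :
    ((if d.contains k then d else d.insert k []).modify k [] (fun xs => xs ++ [issue]))
      = d.modify k [] (fun xs => xs ++ [issue]) := by
  by_cases h : d.contains k = true
  · simp [h]
  · have h' : d.contains k = false := by simpa using h
    simp [h', PySem.Dict.modify, PySem.Dict.getD_insert_self, PySem.Dict.insert_insert_self,
      PySem.Dict.getD_of_not_contains]

lemma pv_fold_eq (issues : List (List (String × String))) :
    issues.foldl (fun d issue =>
      let severity := (PySem.Dict.mk issue).getD "severity" "info"
      let d := if d.contains severity then d else d.insert severity []
      d.modify severity [] (fun xs => xs ++ [issue])) PySem.Dict.empty = pvGroup issues := by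
  have h : (fun (d : PySem.Dict String (List (List (String × String)))) issue =>
      let severity := (PySem.Dict.mk issue).getD "severity" "info"
      let d := if d.contains severity then d else d.insert severity []
      d.modify severity [] (fun xs => xs ++ [issue]))
      = (fun d issue => d.modify (pvSevOf issue) [] (fun xs => xs ++ [issue])) := by
    funext d issue
    exact pv_step_eq d (pvSevOf issue) issue
  rw [h]
  rfl

lemma pv_getD_group (issues : List (List (String × String))) (s : String) :
    (pvGroup issues).getD s [] = issues.filter (fun i => pvSevOf i == s) := by
  unfold pvGroup
  rw [show issues.foldl (fun d issue => d.modify (pvSevOf issue) [] (fun xs => xs ++ [issue]))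
        PySem.Dict.empty
      = (issues.map (fun i => (pvSevOf i, i))).foldl
          (fun d p => d.modify p.1 [] (fun xs => xs ++ [p.2])) PySem.Dict.empty
    from by rw [List.foldl_map]]
  rw [PySem.Dict.getD_foldl_modify_append]
  simp [List.filter_map, Function.comp_def]

lemma pv_contains_group (issues : List (List (String × String))) (s : String) :
    (pvGroup issues).contains s = true ↔ issues.filter (fun i => pvSevOf i == s) ≠ [] := by
  unfold pvGroup
  rw [PySem.Dict.contains_iff_mem_keys, PySem.Dict.keys_foldl_modify_key]
  simp [PySem.Dict.keys_empty, List.filter_eq_nil_iff]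

lemma pv_inner (xs : List (List (String × String))) (lines : List String) :
    xs.foldl (fun lines issue =>
      (if (PySem.Dict.mk issue).contains "field" then
          (lines ++
            ["**" ++ (PySem.Dict.mk issue).getD "type" "Unknown" ++ "**",
             "- Collection: `" ++ (PySem.Dict.mk issue).getD "collection" "Unknown" ++ "`"]) ++
          ["- Field: `" ++ ((PySem.Dict.mk issue).get? "field").getD "" ++ "`"]
        else
          lines ++
            ["**" ++ (PySem.Dict.mk issue).getD "type" "Unknown" ++ "**",
             "- Collection: `" ++ (PySem.Dict.mk issue).getD "collection" "Unknown" ++ "`"]) ++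
      ["- Message: " ++ (PySem.Dict.mk issue).getD "message" "No message", ""]) lines
      = lines ++ xs.flatMap pvIssueLines := by
  have h : (fun (lines : List String) (issue : List (String × String)) =>
      (if (PySem.Dict.mk issue).contains "field" then
          (lines ++
            ["**" ++ (PySem.Dict.mk issue).getD "type" "Unknown" ++ "**",
             "- Collection: `" ++ (PySem.Dict.mk issue).getD "collection" "Unknown" ++ "`"]) ++
          ["- Field: `" ++ ((PySem.Dict.mk issue).get? "field").getD "" ++ "`"]
        else
          lines ++
            ["**" ++ (PySem.Dict.mk issue).getD "type" "Unknown" ++ "**",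
             "- Collection: `" ++ (PySem.Dict.mk issue).getD "collection" "Unknown" ++ "`"]) ++
      ["- Message: " ++ (PySem.Dict.mk issue).getD "message" "No message", ""])
      = fun acc issue => acc ++ pvIssueLines issue := by
    funext acc issue
    unfold pvIssueLines
    by_cases hf : (PySem.Dict.mk issue).contains "field" = true <;> simp [hf]
  rw [h, PySem.List.foldl_append_eq_flatMap]

lemma pv_sec (issues : List (List (String × String))) (s : String) (lines : List String) :
    (if (pvGroup issues).contains s = true then
      ((pvGroup issues).getD s []).foldl (fun lines issue =>
        (if (PySem.Dict.mk issue).contains "field" then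
            (lines ++
              ["**" ++ (PySem.Dict.mk issue).getD "type" "Unknown" ++ "**",
               "- Collection: `" ++ (PySem.Dict.mk issue).getD "collection" "Unknown" ++ "`"]) ++
            ["- Field: `" ++ ((PySem.Dict.mk issue).get? "field").getD "" ++ "`"]
          else
            lines ++
              ["**" ++ (PySem.Dict.mk issue).getD "type" "Unknown" ++ "**",
               "- Collection: `" ++ (PySem.Dict.mk issue).getD "collection" "Unknown" ++ "`"]) ++
        ["- Message: " ++ (PySem.Dict.mk issue).getD "message" "No message", ""])
        (lines ++ ["### " ++ pvTitle s ++ " Issues", ""])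
    else lines) = lines ++ pvSeveritySection s issues := by
  by_cases h : issues.filter (fun i => pvSevOf i == s) = []
  · have hc : ¬ (pvGroup issues).contains s = true := by
      rw [pv_contains_group]; simp [h]
    have h' := h
    simp only [pvSevOf] at h'
    simp [hc, pvSeveritySection, h']
  · have hc : (pvGroup issues).contains s = true := (pv_contains_group _ _).mpr h
    rw [if_pos hc, pv_inner, pv_getD_group]
    have h' := h
    simp only [pvSevOf] at h'
    simp [pvSeveritySection, pvSevOf, h', List.append_assoc]

-- ===== VERDICT (by name: the statement is the Claim_ definition above) =====
theorem generate_issues_markdown_py_spec : Claim_equal_generate_issues_markdown_py := by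
  intro issues _
  unfold Spec_generate_issues_markdown_py
  simp only [generate_issues_markdown_py, generate_issues_markdown_py_alt]
  rw [pv_fold_eq]
  simp only [List.foldl_cons, List.foldl_nil, List.flatMap_cons, List.flatMap_nil,
    List.append_nil]
  rw [pv_sec, pv_sec, pv_sec]
  simp [List.append_assoc]
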